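-- pv_equiv track=rewrite | github.com/bportil1/Algorithm_Implementations | CSCI 532 - HW 2 - Problem 3.py | parallel_arrays_min_queries
-- ===== SOURCE A (Python) =====
-- import math
--
-- def parallel_arrays_min_queries(n: int, arr1: int, arr2: int, arr1_ind: int, arr2_ind:  int, query_count) -> int:
--     #Base Case for recursive calls
--     if n == 1:
--         return max(arr1[arr1_ind], arr2[arr2_ind]), query_count
--
--     #Update middle pointer for arrays
--     k = math.ceil(n/2)
--
--     #Query both databases and update pointers for recursive search
--     if arr1[arr1_ind+k] < arr2[arr2_ind+k]:
--         return parallel_arrays_min_queries(k, arr1, arr2, arr1_ind + int(n/2), arr2_ind, query_count + 2)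
--     else:
--         return parallel_arrays_min_queries(k, arr1, arr2, arr1_ind, arr2_ind + int(n/2), query_count + 2)
-- ===== SOURCE B (Python) =====
-- def parallel_arrays_min_queries(n: int, arr1: int, arr2: int, arr1_ind: int, arr2_ind: int, query_count) -> int:
--     # Phase 1: the schedule of (probe offset k, pointer step) pairs depends only on n.
--     steps = []
--     m = n
--     while m != 1:
--         k = -(-m // 2)          # ceil(m/2), integer arithmetic
--         steps.append((k, m // 2))
--         m = k
--     # Phase 2: walk the precomputed schedule, moving whichever pointer loses the comparison.
--     i, j = arr1_ind, arr2_ind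
--     for k, step in steps:
--         if arr1[i + k] < arr2[j + k]:
--             i += step
--         else:
--             j += step
--     # Each schedule entry costs exactly two queries.
--     return max(arr1[i], arr2[j]), query_count + 2 * len(steps)
-- ===== Notes on version B (the rewrite author's own statement) =====
-- stated objective: alternative
-- what changed: Replaces the recursion with two separated phases: first compute the data-independent schedule of (offset, step) pairs from n alone, then fold the comparisons over that schedule and add 2*len(schedule) to the query count once.
-- outside the precondition, e.g. on parallel_arrays_min_queries(1, [5], [7], -1, -1, 0): A returns (7, 0), B returns (7, 0)
import Mathlib
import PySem

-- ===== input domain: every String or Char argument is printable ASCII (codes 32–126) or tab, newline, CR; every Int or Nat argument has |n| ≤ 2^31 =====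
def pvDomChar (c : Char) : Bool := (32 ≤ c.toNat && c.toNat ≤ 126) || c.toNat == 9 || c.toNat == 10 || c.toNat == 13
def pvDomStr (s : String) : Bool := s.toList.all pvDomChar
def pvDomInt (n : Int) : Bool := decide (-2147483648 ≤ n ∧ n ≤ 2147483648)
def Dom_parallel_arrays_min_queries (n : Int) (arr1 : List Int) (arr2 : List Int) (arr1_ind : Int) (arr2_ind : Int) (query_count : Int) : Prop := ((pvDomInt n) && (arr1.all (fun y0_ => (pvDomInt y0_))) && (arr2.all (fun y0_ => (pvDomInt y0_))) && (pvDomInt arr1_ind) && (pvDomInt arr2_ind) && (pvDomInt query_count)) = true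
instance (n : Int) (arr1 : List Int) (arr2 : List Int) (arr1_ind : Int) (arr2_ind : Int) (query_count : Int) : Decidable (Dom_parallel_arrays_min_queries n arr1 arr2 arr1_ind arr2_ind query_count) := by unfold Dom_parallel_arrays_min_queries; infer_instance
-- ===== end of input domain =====

-- B splits A's recursion into a data-independent schedule of (offset, step) pairs followed by
-- a single fold of the comparisons over it; equivalence of RETURN values is proved on Pre_.

-- ===== PORT A =====
-- Recursion ported with a fuel parameter (n.toNat + 1 is enough: n strictly decreases and
-- stays ≥ 1 under Pre_); the fuel-0 branch is unreachable under Pre_.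
-- math.ceil(n/2) is ported exactly as -((-n) // 2); int(n/2) (truncation toward zero) as Int.tdiv.
def pvGoA (fuel : Nat) (n : Int) (arr1 : List Int) (arr2 : List Int) (i : Int) (j : Int) (qc : Int) : Int × Int :=
  match fuel with
  | 0 => (0, 0)
  | f + 1 =>
    if n = 1 then (max (PySem.List.pyGetD arr1 i 0) (PySem.List.pyGetD arr2 j 0), qc)
    else
      let k := -(PySem.Int.floordiv (-n) 2)
      if PySem.List.pyGetD arr1 (i + k) 0 < PySem.List.pyGetD arr2 (j + k) 0 then
        pvGoA f k arr1 arr2 (i + Int.tdiv n 2) j (qc + 2)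
      else
        pvGoA f k arr1 arr2 i (j + Int.tdiv n 2) (qc + 2)

def parallel_arrays_min_queries (n : Int) (arr1 : List Int) (arr2 : List Int) (arr1_ind : Int) (arr2_ind : Int) (query_count : Int) : Int × Int :=
  pvGoA (n.toNat + 1) n arr1 arr2 arr1_ind arr2_ind query_count

-- ===== PORT B =====
-- the while-loop building the schedule, with the same fuel guard for totality
def pvStepsB (fuel : Nat) (m : Int) : List (Int × Int) :=
  match fuel with
  | 0 => []
  | f + 1 =>
    if m = 1 then []
    else
      let k := -(PySem.Int.floordiv (-m) 2)
      (k, PySem.Int.floordiv m 2) :: pvStepsB f k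

-- the for-loop over the schedule, as a fold on the pointer pair
def pvWalkB (arr1 : List Int) (arr2 : List Int) (steps : List (Int × Int)) (i : Int) (j : Int) : Int × Int :=
  steps.foldl
    (fun p s =>
      if PySem.List.pyGetD arr1 (p.1 + s.1) 0 < PySem.List.pyGetD arr2 (p.2 + s.1) 0 then
        (p.1 + s.2, p.2)
      else
        (p.1, p.2 + s.2))
    (i, j)

def parallel_arrays_min_queries_alt (n : Int) (arr1 : List Int) (arr2 : List Int) (arr1_ind : Int) (arr2_ind : Int) (query_count : Int) : Int × Int :=
  let steps := pvStepsB (n.toNat + 1) n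
  let p := pvWalkB arr1 arr2 steps arr1_ind arr2_ind
  (max (PySem.List.pyGetD arr1 p.1 0) (PySem.List.pyGetD arr2 p.2 0), query_count + 2 * (steps.length : Int))

-- ===== PRECONDITION & SPEC =====
-- Pre_: n ≥ 1 with a full window of n elements inside each array starting at a nonnegative index.
-- For n < 1 the Python A exhausts the recursion limit (RecursionError); out-of-window accesses
-- raise IndexError. Pre_ also excludes negative-index wraparound configurations on which A still
-- returns: that in-range-by-wraparound value is an accident of Python indexing, not the search's domain.
def Pre_parallel_arrays_min_queries (n : Int) (arr1 : List Int) (arr2 : List Int) (arr1_ind : Int) (arr2_ind : Int) (query_count : Int) : Prop :=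
  1 ≤ n ∧ 0 ≤ arr1_ind ∧ arr1_ind + n ≤ arr1.length ∧ 0 ≤ arr2_ind ∧ arr2_ind + n ≤ arr2.length
instance (n : Int) (arr1 : List Int) (arr2 : List Int) (arr1_ind : Int) (arr2_ind : Int) (query_count : Int) : Decidable (Pre_parallel_arrays_min_queries n arr1 arr2 arr1_ind arr2_ind query_count) := by unfold Pre_parallel_arrays_min_queries; infer_instance

def pvWitness_parallel_arrays_min_queries : Int × List Int × List Int × Int × Int × Int :=
  (4, [1, 3, 5, 7], [2, 4, 6, 8], 0, 0, 0)

def Spec_parallel_arrays_min_queries (n : Int) (arr1 : List Int) (arr2 : List Int) (arr1_ind : Int) (arr2_ind : Int) (query_count : Int) (out : Int × Int) : Prop := out = parallel_arrays_min_queries_alt n arr1 arr2 arr1_ind arr2_ind query_count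
instance (n : Int) (arr1 : List Int) (arr2 : List Int) (arr1_ind : Int) (arr2_ind : Int) (query_count : Int) (out : Int × Int) : Decidable (Spec_parallel_arrays_min_queries n arr1 arr2 arr1_ind arr2_ind query_count out) := by unfold Spec_parallel_arrays_min_queries; infer_instance

-- ===== CLAIM (what is proved, stated in full; the proofs are below) =====
def Claim_equal_parallel_arrays_min_queries : Prop := ∀ (n : Int) (arr1 : List Int) (arr2 : List Int) (arr1_ind : Int) (arr2_ind : Int) (query_count : Int), Dom_parallel_arrays_min_queries n arr1 arr2 arr1_ind arr2_ind query_count → Pre_parallel_arrays_min_queries n arr1 arr2 arr1_ind arr2_ind query_count → Spec_parallel_arrays_min_queries n arr1 arr2 arr1_ind arr2_ind query_count (parallel_arrays_min_queries n arr1 arr2 arr1_ind arr2_ind query_count)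

-- ===== LEMMAS AND PROOFS =====

-- Key invariant: with enough fuel and n ≥ 1, A's recursion equals B's schedule-then-fold with the
-- SAME fuel feeding the schedule builder.
theorem pvGoA_eq_schedule (arr1 arr2 : List Int) :
    ∀ (f : Nat) (n i j qc : Int), 1 ≤ n → n ≤ (f : Int) →
      pvGoA f n arr1 arr2 i j qc =
        (max (PySem.List.pyGetD arr1 (pvWalkB arr1 arr2 (pvStepsB f n) i j).1 0)
             (PySem.List.pyGetD arr2 (pvWalkB arr1 arr2 (pvStepsB f n) i j).2 0),
         qc + 2 * ((pvStepsB f n).length : Int)) := by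
  intro f
  induction f with
  | zero => intro n i j qc h1 h2; exact absurd (le_trans h1 h2) (by norm_num)
  | succ f ih =>
    intro n i j qc h1 h2
    by_cases hn : n = 1
    · subst hn
      simp [pvGoA, pvStepsB, pvWalkB]
    · have h2' : 2 ≤ n := by omega
      have hf : PySem.Int.floordiv n 2 = n / 2 :=
        PySem.Int.floordiv_eq_ediv_of_pos (by omega)
      have ht : Int.tdiv n 2 = n / 2 := by
        rw [Int.tdiv_eq_ediv_of_nonneg (by omega)]
      set k := -(PySem.Int.floordiv (-n) 2) with hk
      have hc : k = -((-n) / 2) := by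
        rw [hk, PySem.Int.floordiv_eq_ediv_of_pos (by omega)]
      have hk1 : 1 ≤ k := by omega
      have hk2 : k ≤ n - 1 := by omega
      have hkf : k ≤ (f : Int) := by
        have : n ≤ (f : Int) + 1 := by exact_mod_cast h2
        omega
      have hstep : PySem.Int.floordiv n 2 = Int.tdiv n 2 := by rw [hf, ht]
      rw [show pvGoA (f + 1) n arr1 arr2 i j qc =
            (if PySem.List.pyGetD arr1 (i + k) 0 < PySem.List.pyGetD arr2 (j + k) 0 then
              pvGoA f k arr1 arr2 (i + Int.tdiv n 2) j (qc + 2)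
            else
              pvGoA f k arr1 arr2 i (j + Int.tdiv n 2) (qc + 2)) from by
            rw [hk]; simp only [pvGoA]; rw [if_neg hn]]
      rw [show pvStepsB (f + 1) n = (k, PySem.Int.floordiv n 2) :: pvStepsB f k from by
            rw [hk]; simp only [pvStepsB]; rw [if_neg hn]]
      rw [show ∀ rest : List (Int × Int),
            pvWalkB arr1 arr2 ((k, PySem.Int.floordiv n 2) :: rest) i j =
              (if PySem.List.pyGetD arr1 (i + k) 0 < PySem.List.pyGetD arr2 (j + k) 0 then
                pvWalkB arr1 arr2 rest (i + PySem.Int.floordiv n 2) j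
              else
                pvWalkB arr1 arr2 rest i (j + PySem.Int.floordiv n 2)) from by
            intro rest; simp only [pvWalkB, List.foldl_cons]; split_ifs <;> rfl]
      split_ifs with hcmp
      · rw [ih k (i + Int.tdiv n 2) j (qc + 2) hk1 hkf, hstep]
        simp only [List.length_cons, Prod.mk.injEq]
        exact ⟨trivial, by push_cast; ring⟩
      · rw [ih k i (j + Int.tdiv n 2) (qc + 2) hk1 hkf, hstep]
        simp only [List.length_cons, Prod.mk.injEq]
        exact ⟨trivial, by push_cast; ring⟩

-- ===== VERDICT (by name: the statement is the Claim_ definition above) =====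
theorem parallel_arrays_min_queries_spec : Claim_equal_parallel_arrays_min_queries := by
  intro n arr1 arr2 i j qc _hDom hPre
  obtain ⟨h1, -⟩ := hPre
  unfold Spec_parallel_arrays_min_queries parallel_arrays_min_queries parallel_arrays_min_queries_alt
  exact pvGoA_eq_schedule arr1 arr2 (n.toNat + 1) n i j qc h1 (by omega)
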